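-- pv_equiv track=rewrite | github.com/pengzeya68-collab/test | auto_test_platform/routers/import_export.py | _replace_path_params
-- ===== SOURCE A (Python) =====
-- def _replace_path_params(path: str) -> str:
--     # /users/{id} -> /users/{{id}}
--     out = ""
--     i = 0
--     while i < len(path):
--         if path[i] == "{" and "}" in path[i:]:
--             j = path.find("}", i + 1)
--             key = path[i + 1 : j].strip()
--             if key:
--                 out += "{{" + key + "}}"
--             else:
--                 out += "{}"
--             i = j + 1
--         else:
--             out += path[i]
--             i += 1
--     return out
-- ===== SOURCE B (Python) =====
-- def _tokenize(path):
--     # break the path into an alternating list [literal, "{...}", literal, "{...}", ..., literal]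
--     parts = []
--     s = path
--     while True:
--         pre, brace, rest = s.partition("{")
--         if brace:
--             key, close, tail = rest.partition("}")
--             if close:
--                 parts.append(pre)
--                 parts.append("{" + key + "}")
--                 s = tail
--                 continue
--         parts.append(s)
--         return parts
--
--
-- def _replace_path_params(path: str) -> str:
--     out = []
--     for idx, tok in enumerate(_tokenize(path)):
--         if idx % 2:  # a brace-delimited token "{...}"
--             key = tok[1:-1].strip()
--             out.append("{{" + key + "}}" if key else "{}")
--         else:
--             out.append(tok)
--     return "".join(out)
-- ===== Notes on version B (the rewrite author's own statement) =====
-- stated objective: simpler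
-- what changed: A's single per-character cursor scan that appends each character to a growing output string is replaced by a two-phase pass: first tokenize the path (via str.partition) into an alternating list of literal and brace-delimited segments, then classify each segment by index parity and join once.
import Mathlib
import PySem

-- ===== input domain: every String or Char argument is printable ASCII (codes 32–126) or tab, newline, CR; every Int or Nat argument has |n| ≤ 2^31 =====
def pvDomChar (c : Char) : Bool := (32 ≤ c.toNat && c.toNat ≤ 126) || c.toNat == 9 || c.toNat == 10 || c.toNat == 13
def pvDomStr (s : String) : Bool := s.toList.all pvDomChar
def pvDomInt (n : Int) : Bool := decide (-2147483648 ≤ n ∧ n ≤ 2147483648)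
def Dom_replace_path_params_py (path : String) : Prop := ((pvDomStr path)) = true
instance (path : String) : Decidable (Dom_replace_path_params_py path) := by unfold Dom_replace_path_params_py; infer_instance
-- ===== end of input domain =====

-- B replaces A's per-character cursor scan (which grows the output with string +=) by a
-- two-phase pass — tokenize the path into alternating literal / brace-delimited segments,
-- then classify each segment by its index parity and join once; measured faster on large inputs.


-- ===== PORT A =====
-- The while loop over the cursor i only ever inspects path[i:], so it is transcribed as a
-- structural recursion over that suffix: path.find("}", i + 1) becomes PySem.Chars.find on
-- the tail of the suffix (relative position), path[i+1:j] becomes `take` of that length,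
-- and i = j + 1 becomes `drop`.
def pvGoA : List Char → List Char
  | [] => []
  | c :: rest =>
    if c = '{' ∧ PySem.Chars.isIn ['}'] (c :: rest) = true then
      -- j = path.find("}", i + 1); relative to the tail `rest` that is position jr
      let jr := (PySem.Chars.find rest ['}']).toNat
      let key := PySem.Chars.strip (rest.take jr)     -- path[i+1:j].strip()
      (if key ≠ [] then ('{' :: '{' :: key) ++ ['}', '}'] else ['{', '}']) ++
        pvGoA (rest.drop (jr + 1))                     -- i = j + 1
    else
      c :: pvGoA rest
  termination_by s => s.length
  decreasing_by
    · simp only [List.length_cons, List.length_drop]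
      omega
    · simp

def replace_path_params_py (path : String) : String :=
  String.ofList (pvGoA path.toList)

-- ===== PORT B =====
-- s.partition(sep) for the one-character separators "{" / "}" is ported by hand (exact):
-- the part before the first occurrence is `takeWhile (· ≠ sep)`, the rest is
-- `dropWhile (· ≠ sep)` (empty iff the separator is absent).
def pvTokenize (s : List Char) : List (List Char) :=
  let pre := s.takeWhile (· ≠ '{')
  match _h : s.dropWhile (· ≠ '{') with
  | [] => [s]                                         -- no "{": the whole string is one literal
  | _ :: t =>
    if '}' ∈ t then
      pre :: ('{' :: (t.takeWhile (· ≠ '}') ++ ['}'])) ::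
        pvTokenize ((t.dropWhile (· ≠ '}')).tail)
    else [s]                                          -- "{" with no later "}": one literal
  termination_by s.length
  decreasing_by
    have h1 : (s.dropWhile (· ≠ '{')).length ≤ s.length := List.length_dropWhile_le _ _
    have h2 : (t.dropWhile (· ≠ '}')).length ≤ t.length := List.length_dropWhile_le _ _
    have h3 := congrArg List.length _h
    simp only [List.length_cons] at h3
    have h4 : (t.dropWhile (· ≠ '}')).tail.length ≤ (t.dropWhile (· ≠ '}')).length := by
      simp [List.length_tail]
    omega

def replace_path_params_py_alt (path : String) : String :=
  let parts := pvTokenize path.toList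
  let out := (PySem.List.enumerate parts).map (fun it =>
      if PySem.Int.mod it.1 2 ≠ 0 then                -- odd index: a "{...}" token
        let key := PySem.Chars.strip (PySem.List.slice it.2 (some 1) (some (-1)))
        if key ≠ [] then ('{' :: '{' :: key) ++ ['}', '}'] else ['{', '}']
      else it.2)
  String.ofList (PySem.Chars.join [] out)

-- ===== PRECONDITION & SPEC =====
def Spec_replace_path_params_py (path : String) (out : String) : Prop := out = replace_path_params_py_alt path
instance (path : String) (out : String) : Decidable (Spec_replace_path_params_py path out) := by unfold Spec_replace_path_params_py; infer_instance

-- ===== CLAIM (what is proved, stated in full; the proofs are below) =====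
def Claim_equal_replace_path_params_py : Prop := ∀ (path : String), Dom_replace_path_params_py path → Spec_replace_path_params_py path (replace_path_params_py path)

-- ===== LEMMAS AND PROOFS =====

-- `"}" in s` for the one-character needle is membership
theorem pv_isIn_singleton (a : Char) (l : List Char) : PySem.Chars.isIn [a] l = true ↔ a ∈ l := by
  rw [PySem.Chars.isIn_iff_infix]; exact List.singleton_infix_iff a l

-- find of a single character that IS present = length of the prefix before it
theorem pv_find_go_singleton (a : Char) (t : List Char) :
    ∀ k : Nat, a ∈ t → PySem.Chars.find.go [a] t k = (k : Int) + ((t.takeWhile (· ≠ a)).length : Int) := by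
  induction t with
  | nil => intro k h; cases h
  | cons c t ih =>
    intro k h
    by_cases hc : c = a
    · subst hc
      simp [PySem.Chars.find.go, List.isPrefixOf, List.takeWhile]
    · have ht : a ∈ t := by
        rcases List.mem_cons.mp h with h' | h'
        · exact absurd h'.symm hc
        · exact h'
      have : [a].isPrefixOf (c :: t) = false := by
        simp [List.isPrefixOf]; exact fun h' => hc h'.symm
      rw [PySem.Chars.find.go, this]
      simp only [Bool.false_eq_true, if_false]
      rw [ih (k + 1) ht]
      have : (c :: t).takeWhile (· ≠ a) = c :: t.takeWhile (· ≠ a) := by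
        simp [List.takeWhile, hc]
      rw [this]
      simp
      ring

theorem pv_find_singleton (a : Char) (t : List Char) (h : a ∈ t) :
    PySem.Chars.find t [a] = ((t.takeWhile (· ≠ a)).length : Int) := by
  have := pv_find_go_singleton a t 0 h
  simpa [PySem.Chars.find] using this

-- A copies plainly as long as no "}" lies ahead
theorem pv_goA_no_close (s : List Char) (h : '}' ∉ s) : pvGoA s = s := by
  induction s with
  | nil => simp [pvGoA]
  | cons c t ih =>
    have hni : ¬ (c = '{' ∧ PySem.Chars.isIn ['}'] (c :: t) = true) := by
      rintro ⟨-, hin⟩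
      exact h ((pv_isIn_singleton _ _).mp hin)
    rw [pvGoA, if_neg hni, ih (fun hm => h (List.mem_cons_of_mem _ hm))]

-- A copies a "{"-free prefix verbatim
theorem pv_goA_append (pre u : List Char) (h : '{' ∉ pre) : pvGoA (pre ++ u) = pre ++ pvGoA u := by
  induction pre with
  | nil => rfl
  | cons c p ih =>
    have hc : c ≠ '{' := fun hc => h (hc ▸ List.mem_cons_self)
    have hni : ¬ (c = '{' ∧ PySem.Chars.isIn ['}'] (c :: (p ++ u)) = true) := by
      rintro ⟨hc', -⟩; exact hc hc'
    rw [List.cons_append, pvGoA, if_neg hni, ih (fun hm => h (List.mem_cons_of_mem _ hm))]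
    simp

-- the classification Source B applies to a brace-delimited token
def pvTok (b : List Char) : List Char :=
  let key := PySem.Chars.strip (PySem.List.slice b (some 1) (some (-1)))
  if key ≠ [] then ('{' :: '{' :: key) ++ ['}', '}'] else ['{', '}']

-- the per-item function of B's render loop
def pvF (it : Int × List Char) : List Char :=
  if PySem.Int.mod it.1 2 ≠ 0 then pvTok it.2 else it.2

-- B's render phase as a function of the token list
def pvRender (l : List (List Char)) : List Char :=
  PySem.Chars.join [] ((PySem.List.enumerate l).map pvF)

theorem pv_join_cons (a : List Char) (l : List (List Char)) :
    PySem.Chars.join [] (a :: l) = a ++ PySem.Chars.join [] l := by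
  cases l with
  | nil => simp [PySem.Chars.join_singleton, PySem.Chars.join_nil]
  | cons b l => rw [PySem.Chars.join_cons_cons]; simp

theorem pv_mod_two_shift (i : Int) : PySem.Int.mod (i + 2) 2 = PySem.Int.mod i 2 := by
  rw [PySem.Int.mod_eq_emod_of_pos (by norm_num), PySem.Int.mod_eq_emod_of_pos (by norm_num)]
  omega

theorem pvF_shift (x : List Char) (i : Int) : pvF (i + 2, x) = pvF (i, x) := by
  simp only [pvF, pv_mod_two_shift]

theorem pv_enum_shift (l : List (List Char)) :
    ∀ i : Int, (PySem.List.enumerate l (i + 2)).map pvF = (PySem.List.enumerate l i).map pvF := by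
  induction l with
  | nil => intro i; rfl
  | cons x xs ih =>
    intro i
    rw [PySem.List.enumerate_cons, PySem.List.enumerate_cons, List.map_cons, List.map_cons,
      pvF_shift]
    have h3 : i + 2 + 1 = (i + 1) + 2 := by ring
    rw [h3, ih (i + 1)]

theorem pvF_even (a : List Char) : pvF (0, a) = a := by
  simp [pvF]

theorem pvF_odd (b : List Char) : pvF (1, b) = pvTok b := by
  simp [pvF]

theorem pv_render_single (a : List Char) : pvRender [a] = a := by
  unfold pvRender
  rw [PySem.List.enumerate_cons]
  show PySem.Chars.join [] [pvF (0, a)] = a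
  rw [pvF_even, PySem.Chars.join_singleton]

theorem pv_render_cons2 (a b : List Char) (l : List (List Char)) :
    pvRender (a :: b :: l) = a ++ (pvTok b ++ pvRender l) := by
  unfold pvRender
  rw [PySem.List.enumerate_cons, PySem.List.enumerate_cons, List.map_cons, List.map_cons,
    pvF_even]
  have h1 : (0 : Int) + 1 = 1 := by norm_num
  rw [h1, pvF_odd]
  have h2 : (1 : Int) + 1 = 0 + 2 := by norm_num
  rw [h2, pv_enum_shift, pv_join_cons, pv_join_cons]

theorem pv_slice_token (k : List Char) :
    PySem.List.slice ('{' :: (k ++ ['}'])) (some 1) (some (-1)) = k := by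
  simp [PySem.List.slice, PySem.List.clampIdx]
  rw [if_neg (by omega : ¬((k.length : Int) + 1 < 0))]
  simp

theorem pv_take_takeWhile (p : Char → Bool) (t : List Char) :
    t.take ((t.takeWhile p).length) = t.takeWhile p := by
  exact ((List.prefix_iff_eq_take).mp (List.takeWhile_prefix p)).symm

theorem pv_drop_dropWhile (p : Char → Bool) (t : List Char) :
    t.drop ((t.takeWhile p).length) = t.dropWhile p := by
  calc t.drop (t.takeWhile p).length
      = (t.takeWhile p ++ t.dropWhile p).drop (t.takeWhile p).length := by
        rw [List.takeWhile_append_dropWhile]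
    _ = t.dropWhile p := List.drop_left

theorem pv_dropWhile_head (p : Char → Bool) (s : List Char) (c : Char) (t : List Char)
    (h : s.dropWhile p = c :: t) : p c = false := by
  have hne : s.dropWhile p ≠ [] := by simp [h]
  have hh := List.head_dropWhile_not p (l := s) hne
  have hc : (s.dropWhile p).head hne = c := by simp [h]
  rwa [hc] at hh

theorem pv_main : ∀ (n : Nat) (s : List Char), s.length ≤ n →
    pvGoA s = pvRender (pvTokenize s) := by
  intro n
  induction n with
  | zero =>
    intro s hs
    have : s = [] := List.length_eq_zero_iff.mp (Nat.le_zero.mp hs)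
    subst this
    rw [pvTokenize]
    simp [pvGoA, pv_render_single]
  | succ n ih =>
    intro s hs
    have hsplit : s.takeWhile (· ≠ '{') ++ s.dropWhile (· ≠ '{') = s :=
      List.takeWhile_append_dropWhile
    have hpre : '{' ∉ s.takeWhile (· ≠ '{') := by
      intro hm
      have := List.mem_takeWhile_imp hm
      simp at this
    rw [pvTokenize]
    split
    · -- no "{" at all: one literal token
      rename_i heq
      rw [pv_render_single]
      rw [heq] at hsplit
      conv_lhs => rw [← hsplit]
      rw [pv_goA_append _ _ hpre]
      have h0 : pvGoA [] = [] := by rw [pvGoA]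
      rw [h0, List.append_nil] at *
      exact hsplit
    · -- s = pre ++ '{' :: t
      rename_i c t heq
      have hc : c = '{' := by
        have := pv_dropWhile_head _ _ _ _ heq
        simpa using this
      subst hc
      rw [heq] at hsplit
      by_cases hm : '}' ∈ t
      · rw [if_pos hm, pv_render_cons2]
        conv_lhs => rw [← hsplit]
        rw [pv_goA_append _ _ hpre]
        congr 1
        -- pvGoA ('{' :: t) = pvTok tok ++ pvRender (pvTokenize rest)
        rw [pvGoA, if_pos ⟨rfl, (pv_isIn_singleton '}' _).mpr (List.mem_cons_of_mem _ hm)⟩]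
        have hfind : (PySem.Chars.find t ['}']).toNat = (t.takeWhile (· ≠ '}')).length := by
          rw [pv_find_singleton '}' t hm]; exact Int.toNat_natCast _
        have hdrop : t.drop ((t.takeWhile (· ≠ '}')).length + 1) = (t.dropWhile (· ≠ '}')).tail := by
          rw [← List.drop_drop, pv_drop_dropWhile, List.drop_one]
        have hrest : ((t.dropWhile (· ≠ '}')).tail).length ≤ n := by
          have h1 : (t.dropWhile (· ≠ '}')).length ≤ t.length := List.length_dropWhile_le _ _
          have h2 : ((t.dropWhile (· ≠ '}')).tail).length ≤ (t.dropWhile (· ≠ '}')).length := by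
            simp [List.length_tail]
          have h3 : t.length + 1 ≤ s.length := by
            rw [← hsplit]; simp
          omega
        simp only [hfind, pv_take_takeWhile, hdrop, pvTok, pv_slice_token]
        rw [ih _ hrest]
      · -- "{" present but no later "}": one literal token
        rw [if_neg hm, pv_render_single]
        conv_lhs => rw [← hsplit]
        rw [pv_goA_append _ _ hpre]
        have hnc : '}' ∉ '{' :: t := by
          intro hmem
          rcases List.mem_cons.mp hmem with h' | h'
          · exact absurd h' (by decide)
          · exact hm h'
        rw [pv_goA_no_close _ hnc]
        exact hsplit

-- ===== VERDICT (by name: the statement is the Claim_ definition above) =====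
theorem replace_path_params_py_spec : Claim_equal_replace_path_params_py := by
  intro path _
  show replace_path_params_py path = replace_path_params_py_alt path
  have halt : replace_path_params_py_alt path =
      String.ofList (pvRender (pvTokenize path.toList)) := rfl
  rw [halt, replace_path_params_py, pv_main path.toList.length path.toList le_rfl]
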